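-- pv_equiv track=rewrite | github.com/mingo2/Calcolo-automatico-per-la-meccanica-dei-solidi | BiforcazioneFlessibile.py | sistema_relazioni
-- ===== SOURCE A (Python) =====
-- def Pu_(Pr):
--     P = []
--     n = len(Pr)
--     for i in range(n):
--         P.append([])
--         for j in range(len(Pr[i])):
--             P[-1].append(Pr[i][j])
--     return P
--
-- def sistema_relazioni(Relazioni,Pr):
--     Pu = Pu_(Pr)#[['A',  'B',  'C' ], ['C',  'D',  'E' ], ['C',  'F',  'E',  'G' ]]
--     #Creiamo una lista di liste ove ogni sottolista, rappresentativa di un corpo, contiene tutti i collegamenti fra aste di quel corpo.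
--     #es1 Relazioni = {'A': ['B'], 'B': ['A', 'C'], 'C': ['B', 'D', 'G'], 'D': ['C', 'E'], 'E': ['D', 'F', 'G'], 'F': ['E'], 'G': ['E', 'C']}
--     #--> Obiettivo = [['AB','BC'],['CG','GE'],['CD','DE','EF']]#gli elementi di ogni sottolista non saranno necessariamente nell'ordine indicato
--     n = len(Pr)
--     Collegamenti = []
--     for i in range(n):
--         Collegamenti.append([])
--         for j in Relazioni:
--             if j in Pu[i]:
--                 for k in Relazioni[j]:
--                     if k in Pu[i]:
--                         if (j+k and k+j) not in Collegamenti[i]: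
--                             Collegamenti[i].append(j+k)
--     return Collegamenti
-- ===== SOURCE B (Python) =====
-- def sistema_relazioni(Relazioni, Pr):
--     # Pass 1 (once, body-independent): flatten the graph into an ordered pair list and
--     # precompute, for each pair index t, the earlier indices whose forward string equals
--     # t's reversed string (the only candidates A's reverse-dedup test can ever hit).
--     pairs = [(j, k) for j in Relazioni for k in Relazioni[j]]
--     by_fwd = {}
--     cands = []
--     for t, (j, k) in enumerate(pairs):
--         cands.append(list(by_fwd.get(k + j, [])))
--         by_fwd.setdefault(j + k, []).append(t)
--     # Pass 2: per body, a boolean array over pair indices replaces every string-list scan.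
--     out = []
--     for body in Pr:
--         members = set(body)
--         kept = [False] * len(pairs)
--         row = []
--         for t, (j, k) in enumerate(pairs):
--             if j in members and k in members and not any(kept[s] for s in cands[t]):
--                 kept[t] = True
--                 row.append(j + k)
--         out.append(row)
--     return out
-- ===== Notes on version B (the rewrite author's own statement) =====
-- stated objective: faster
-- what changed: B flattens the graph into an ordered pair list once and precomputes, per pair, the earlier indices whose forward concatenation equals its reversed one; each body is then processed with a boolean array over pair indices, eliminating A's per-body graph rescan and its string-list membership scans.
import Mathlib
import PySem

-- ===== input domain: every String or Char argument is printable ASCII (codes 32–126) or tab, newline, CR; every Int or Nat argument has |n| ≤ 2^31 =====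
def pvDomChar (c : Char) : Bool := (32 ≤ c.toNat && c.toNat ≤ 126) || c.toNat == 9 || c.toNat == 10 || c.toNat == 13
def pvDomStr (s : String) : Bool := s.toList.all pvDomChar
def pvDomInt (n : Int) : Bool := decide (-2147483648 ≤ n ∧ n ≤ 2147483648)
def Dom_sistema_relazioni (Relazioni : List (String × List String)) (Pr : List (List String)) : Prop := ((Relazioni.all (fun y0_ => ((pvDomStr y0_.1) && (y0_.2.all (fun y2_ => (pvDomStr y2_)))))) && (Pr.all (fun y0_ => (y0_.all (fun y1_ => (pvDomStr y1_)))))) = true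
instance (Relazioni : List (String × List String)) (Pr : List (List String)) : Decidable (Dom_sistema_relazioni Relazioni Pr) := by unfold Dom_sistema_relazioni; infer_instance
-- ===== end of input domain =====

-- B flattens the graph into a pair list once, precomputes for every pair the earlier indices its
-- reverse-dedup test could hit, and then runs each body with a boolean array over pair indices,
-- instead of A's per-body rescan of the whole graph with string-list membership (objective: faster).

-- ===== PORT A =====
-- helper Pu_ of A: deep copy of Pr built index by index (indices are always in range, so getD's default is never used)
def Pu_ (Pr : List (List String)) : List (List String) :=
  (List.range Pr.length).foldl
    (fun P i =>
      P ++ [(List.range (Pr.getD i []).length).foldl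
              (fun q j => q ++ [(Pr.getD i []).getD j ""]) []])
    []

-- 'for j in Relazioni' iterates the dict's keys; 'Relazioni[j]' is first-match lookup (PySem.Dict on the assoc list).
-- '(j+k and k+j) not in Collegamenti[i]': Python's 'and' yields j+k when j+k is the empty (falsy) string, else k+j.
def sistema_relazioni (Relazioni : List (String × List String)) (Pr : List (List String)) : List (List String) :=
  let Pu := Pu_ Pr
  let n := Pr.length
  (List.range n).foldl
    (fun C i =>
      C ++ [((PySem.Dict.mk Relazioni).keys).foldl
        (fun acc j =>
          if j ∈ Pu.getD i [] then
            ((PySem.Dict.mk Relazioni).getD j []).foldl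
              (fun acc2 k =>
                if k ∈ Pu.getD i [] then
                  if (if (j ++ k) = "" then j ++ k else k ++ j) ∉ acc2 then acc2 ++ [j ++ k]
                  else acc2
                else acc2)
              acc
          else acc)
        []])
    []

-- ===== PORT B =====
-- indices t produced by enumerate are 0 ≤ t < len(pairs), so 'kept[t] = True' / 'cands[t]' / 'kept[s]'
-- never raise; 'kept[t] = True' is ported as List.set at t.toNat (t is a nonnegative in-range index: exact).
def sistema_relazioni_alt (Relazioni : List (String × List String)) (Pr : List (List String)) : List (List String) :=
  let d := PySem.Dict.mk Relazioni
  let pairs := (d.keys).flatMap (fun j => (d.getD j []).map (fun k => (j, k)))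
  let bc :=
    (PySem.List.enumerate pairs).foldl
      (fun (st : PySem.Dict String (List Int) × List (List Int)) tp =>
        (st.1.modify (tp.2.1 ++ tp.2.2) [] (fun li => li ++ [tp.1]),
         st.2 ++ [st.1.getD (tp.2.2 ++ tp.2.1) []]))
      (PySem.Dict.empty, [])
  let cands := bc.2
  Pr.map (fun body =>
    let members := PySem.Set.ofList body
    let fin :=
      (PySem.List.enumerate pairs).foldl
        (fun (st : List Bool × List String) tp =>
          if (decide (tp.2.1 ∈ members) && decide (tp.2.2 ∈ members))
              && !((PySem.List.pyGetD cands tp.1 []).any (fun s => PySem.List.pyGetD st.1 s false))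
          then (st.1.set tp.1.toNat true, st.2 ++ [tp.2.1 ++ tp.2.2])
          else st)
        (List.replicate pairs.length false, [])
    fin.2)

-- ===== PRECONDITION & SPEC =====
def Spec_sistema_relazioni (Relazioni : List (String × List String)) (Pr : List (List String)) (out : List (List String)) : Prop := out = sistema_relazioni_alt Relazioni Pr
instance (Relazioni : List (String × List String)) (Pr : List (List String)) (out : List (List String)) : Decidable (Spec_sistema_relazioni Relazioni Pr out) := by unfold Spec_sistema_relazioni; infer_instance

-- ===== CLAIM (what is proved, stated in full; the proofs are below) =====
def Claim_equal_sistema_relazioni : Prop := ∀ (Relazioni : List (String × List String)) (Pr : List (List String)), Dom_sistema_relazioni Relazioni Pr → Spec_sistema_relazioni Relazioni Pr (sistema_relazioni Relazioni Pr)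

-- ===== LEMMAS AND PROOFS =====

-- the ordered (j, k) pairs of the relation graph, as both programs traverse them
def pvPairs (Relazioni : List (String × List String)) : List (String × String) :=
  ((PySem.Dict.mk Relazioni).keys).flatMap
    (fun j => ((PySem.Dict.mk Relazioni).getD j []).map (fun k => (j, k)))

-- forward / reversed concatenation of the pair at index t
def pvFwd (ps : List (String × String)) (t : Nat) : String :=
  (ps.getD t ("", "")).1 ++ (ps.getD t ("", "")).2
def pvRev (ps : List (String × String)) (t : Nat) : String :=
  (ps.getD t ("", "")).2 ++ (ps.getD t ("", "")).1

-- the candidate list B precomputes for index t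
def pvCan (ps : List (String × String)) (t : Nat) : List Int :=
  ((List.range t).filter (fun s => pvFwd ps s == pvRev ps t)).map Int.ofNat

-- A's per-body loop body, flattened over the pair list
def pvAfun (P : List String) (acc : List String) (p : String × String) : List String :=
  if p.1 ∈ P then
    if p.2 ∈ P then
      if (if (p.1 ++ p.2) = "" then p.1 ++ p.2 else p.2 ++ p.1) ∉ acc then acc ++ [p.1 ++ p.2]
      else acc
    else acc
  else acc

lemma pvTest_eq (j k : String) :
    (if (j ++ k) = "" then j ++ k else k ++ j) = k ++ j := by
  split
  · rename_i h
    obtain ⟨h1, h2⟩ := String.append_eq_empty_iff.mp h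
    simp [h1, h2]
  · rfl

lemma pvMapRangeGetD {α : Type} (l : List α) (d : α) :
    (List.range l.length).map (fun i => l.getD i d) = l := by
  apply List.ext_getElem
  · simp
  · intro i h1 h2
    simp only [List.getElem_map, List.getElem_range]
    rw [List.getD_eq_getElem l d (by simpa using h2)]

lemma pvPu_eq (Pr : List (List String)) : Pu_ Pr = Pr := by
  unfold Pu_
  rw [PySem.List.foldl_append_singleton_eq_map
        (f := fun i => (List.range (Pr.getD i []).length).foldl
              (fun q j => q ++ [(Pr.getD i []).getD j ""]) [])]
  simp only [List.nil_append]
  have : ∀ i, (List.range (Pr.getD i []).length).foldl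
      (fun q j => q ++ [(Pr.getD i []).getD j ""]) [] = Pr.getD i [] := by
    intro i
    rw [PySem.List.foldl_append_singleton_eq_map (f := fun j => (Pr.getD i []).getD j "")]
    rw [List.nil_append]
    exact pvMapRangeGetD _ _
  simp only [this]
  exact pvMapRangeGetD Pr []

-- A's inner (per-body) nested loops equal the flat fold of pvAfun over the pair list
lemma pvA_inner_eq (Relazioni : List (String × List String)) (P : List String) :
    ((PySem.Dict.mk Relazioni).keys).foldl
        (fun acc j =>
          if j ∈ P then
            ((PySem.Dict.mk Relazioni).getD j []).foldl
              (fun acc2 k =>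
                if k ∈ P then
                  if (if (j ++ k) = "" then j ++ k else k ++ j) ∉ acc2 then acc2 ++ [j ++ k]
                  else acc2
                else acc2)
              acc
          else acc)
        []
      = (pvPairs Relazioni).foldl (pvAfun P) [] := by
  unfold pvPairs
  rw [List.foldl_flatMap]
  apply PySem.List.foldl_congr_mem
  intro acc j _
  rw [List.foldl_map]
  by_cases hj : j ∈ P
  · rw [if_pos hj]
    apply PySem.List.foldl_congr_mem
    intro acc2 k _
    simp [pvAfun, hj]
  · rw [if_neg hj]
    have : ∀ acc2 k, pvAfun P acc2 (j, k) = acc2 := by intro acc2 k; simp [pvAfun, hj]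
    refine Eq.symm ?_
    calc ((PySem.Dict.mk Relazioni).getD j []).foldl (fun acc2 k => pvAfun P acc2 (j, k)) acc
        = ((PySem.Dict.mk Relazioni).getD j []).foldl (fun acc2 _ => acc2) acc := by
          apply PySem.List.foldl_congr_mem; intro a b _; exact this a b
      _ = acc := List.foldl_fixed _

lemma pvGetD_append_last {α : Type} (l : List α) (z d : α) :
    (l ++ [z]).getD l.length d = z := by
  rw [List.getD_eq_getElem?_getD, List.getElem?_append_right (Nat.le_refl _)]
  simp

lemma pvGetD_set (l : List Bool) (n s : Nat) (h : n < l.length) :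
    (l.set n true).getD s false = if s = n then true else l.getD s false := by
  rw [List.getD_eq_getElem?_getD, List.getElem?_set]
  split_ifs with h1 h2 h3
  · simp
  · omega
  · omega
  · rw [List.getD_eq_getElem?_getD]

lemma pvGetD_replicate (n s : Nat) : (List.replicate n false).getD s false = false := by
  rw [List.getD_eq_getElem?_getD, List.getElem?_replicate]
  split_ifs <;> simp

-- pass 1: the candidate-list build computes pvCan at every index
lemma pvCands_inv (ps : List (String × String)) :
    ∀ (l : List (String × String)) (n : Nat) (dct : PySem.Dict String (List Int)) (c : List (List Int)),
      (∀ m : Nat, m < l.length → l.getD m ("", "") = ps.getD (n + m) ("", "")) →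
      n + l.length = ps.length →
      (∀ x : String, dct.getD x [] =
        ((List.range n).filter (fun s => pvFwd ps s == x)).map Int.ofNat) →
      c.length = n →
      (∀ t : Nat, t < n → c.getD t [] = pvCan ps t) →
      (((PySem.List.enumerate l (n : Int)).foldl
          (fun (st : PySem.Dict String (List Int) × List (List Int)) tp =>
            (st.1.modify (tp.2.1 ++ tp.2.2) [] (fun li => li ++ [tp.1]),
             st.2 ++ [st.1.getD (tp.2.2 ++ tp.2.1) []]))
          (dct, c)).2.length = ps.length ∧
       ∀ t : Nat, t < ps.length →
        ((PySem.List.enumerate l (n : Int)).foldl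
          (fun (st : PySem.Dict String (List Int) × List (List Int)) tp =>
            (st.1.modify (tp.2.1 ++ tp.2.2) [] (fun li => li ++ [tp.1]),
             st.2 ++ [st.1.getD (tp.2.2 ++ tp.2.1) []]))
          (dct, c)).2.getD t [] = pvCan ps t) := by
  intro l
  induction l with
  | nil =>
    intro n dct c h1 h2 hd hclen hct
    simp only [PySem.List.enumerate_nil, List.foldl_nil]
    simp only [List.length_nil] at h2
    refine ⟨by omega, ?_⟩
    intro t ht
    exact hct t (by omega)
  | cons x xs ih =>
    intro n dct c h1 h2 hd hclen hct
    rw [PySem.List.enumerate_cons]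
    simp only [List.foldl_cons]
    have hx : x = ps.getD n ("", "") := by
      have := h1 0 (by simp)
      simpa using this
    have hcast : (n : Int) + 1 = ((n + 1 : Nat) : Int) := by push_cast; ring
    rw [hcast]
    apply ih (n + 1)
    · intro m hm
      have := h1 (m + 1) (by simp only [List.length_cons]; omega)
      simpa [Nat.add_assoc, Nat.add_comm 1 m] using this
    · simp only [List.length_cons] at h2; omega
    · intro y
      rw [PySem.Dict.getD_modify]
      by_cases hy : y = x.1 ++ x.2
      · subst hy
        rw [if_pos rfl]
        have hfn : pvFwd ps n = x.1 ++ x.2 := by rw [pvFwd, ← hx]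
        rw [hd (x.1 ++ x.2), List.range_succ, List.filter_append, List.map_append]
        simp [hfn, Int.ofNat_eq_natCast]
      · rw [if_neg hy]
        have hfn : pvFwd ps n ≠ y := by rw [pvFwd, ← hx]; exact fun h => hy h.symm
        rw [hd y, List.range_succ, List.filter_append, List.map_append]
        simp [hfn]
    · simp [hclen]
    · intro t ht
      rcases Nat.lt_succ_iff_lt_or_eq.mp ht with h | h
      · rw [List.getD_append _ _ _ _ (by omega)]
        exact hct t h
      · subst h
        have : t = c.length := hclen.symm
        rw [this, pvGetD_append_last]
        have hrn : x.2 ++ x.1 = pvRev ps t := by rw [pvRev, ← hx]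
        rw [hd (x.2 ++ x.1), hrn]
        rw [pvCan]
        rw [← this]

-- pass 2: per body, the boolean-array fold computes A's accumulator
lemma pvBody_inv (ps : List (String × String)) (cands : List (List Int))
    (hcv : ∀ t : Nat, t < ps.length → cands.getD t [] = pvCan ps t)
    (P : List String) :
    ∀ (l : List (String × String)) (n : Nat) (kept : List Bool) (row : List String),
      (∀ m : Nat, m < l.length → l.getD m ("", "") = ps.getD (n + m) ("", "")) →
      n + l.length = ps.length →
      kept.length = ps.length →
      (∀ s : Nat, kept.getD s false = true → s < n) →
      (∀ x : String, x ∈ row ↔ ∃ s : Nat, kept.getD s false = true ∧ pvFwd ps s = x) →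
      l.foldl (pvAfun P) row
        = ((PySem.List.enumerate l (n : Int)).foldl
            (fun (st : List Bool × List String) tp =>
              if (decide (tp.2.1 ∈ P) && decide (tp.2.2 ∈ P))
                  && !((PySem.List.pyGetD cands tp.1 []).any (fun s => PySem.List.pyGetD st.1 s false))
              then (st.1.set tp.1.toNat true, st.2 ++ [tp.2.1 ++ tp.2.2])
              else st)
            (kept, row)).2 := by
  intro l
  induction l with
  | nil =>
    intro n kept row _ _ _ _ _
    simp [PySem.List.enumerate_nil]
  | cons x xs ih =>
    intro n kept row h1 h2 hlen hk hmem
    rw [PySem.List.enumerate_cons]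
    simp only [List.foldl_cons]
    have hx : x = ps.getD n ("", "") := by
      have := h1 0 (by simp)
      simpa using this
    have hn : n < ps.length := by simp at h2; omega
    have hcast : (n : Int) + 1 = ((n + 1 : Nat) : Int) := by push_cast; ring
    have h1' : ∀ m : Nat, m < xs.length → xs.getD m ("", "") = ps.getD (n + 1 + m) ("", "") := by
      intro m hm
      have := h1 (m + 1) (by simp only [List.length_cons]; omega)
      simpa [Nat.add_assoc, Nat.add_comm 1 m] using this
    have h2' : n + 1 + xs.length = ps.length := by simp at h2; omega
    have hcand : PySem.List.pyGetD cands ((n : Int)) [] = pvCan ps n := by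
      rw [PySem.List.pyGetD_natCast]
      exact hcv n hn
    have hiff : ((pvCan ps n).any (fun s => PySem.List.pyGetD kept s false) = true) ↔ pvRev ps n ∈ row := by
      rw [pvCan, List.any_map, List.any_eq_true]
      constructor
      · rintro ⟨s, hs, hval⟩
        obtain ⟨hsr, hseq⟩ := List.mem_filter.mp hs
        have : kept.getD s false = true := by
          rwa [Function.comp, Int.ofNat_eq_natCast, PySem.List.pyGetD_natCast] at hval
        exact (hmem (pvRev ps n)).mpr ⟨s, this, beq_iff_eq.mp (by simpa using hseq)⟩
      · intro hr
        obtain ⟨s, hks, hfs⟩ := (hmem (pvRev ps n)).mp hr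
        refine ⟨s, List.mem_filter.mpr ⟨List.mem_range.mpr (hk s hks), by simpa using beq_iff_eq.mpr hfs⟩, ?_⟩
        rw [Function.comp, Int.ofNat_eq_natCast, PySem.List.pyGetD_natCast]
        exact hks
    by_cases hj : x.1 ∈ P
    · by_cases hk2 : x.2 ∈ P
      · by_cases hrow : pvRev ps n ∈ row
        · -- A skips (reverse already appended) and B skips (a kept candidate exists)
          have hA : pvAfun P row x = row := by
            rw [pvAfun, if_pos hj, if_pos hk2, pvTest_eq]
            rw [if_neg (not_not_intro (by rw [show x.2 ++ x.1 = pvRev ps n from by rw [pvRev, ← hx]]; exact hrow))]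
          have hany : ((pvCan ps n).any (fun s => PySem.List.pyGetD kept s false)) = true := hiff.mpr hrow
          have hB : (if (decide (x.1 ∈ P) && decide (x.2 ∈ P))
                  && !((PySem.List.pyGetD cands ((n : Int)) []).any (fun s => PySem.List.pyGetD kept s false))
              then (kept.set ((n : Int)).toNat true, row ++ [x.1 ++ x.2])
              else (kept, row)) = (kept, row) := by
            rw [hcand, hany]
            simp
          rw [hA, hB, hcast]
          exact ih (n + 1) kept row h1' h2' hlen (fun s hs => Nat.lt_succ_of_lt (hk s hs)) hmem
        · -- A appends and B keeps index n
          have hA : pvAfun P row x = row ++ [x.1 ++ x.2] := by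
            rw [pvAfun, if_pos hj, if_pos hk2, pvTest_eq]
            rw [if_pos (by rw [show x.2 ++ x.1 = pvRev ps n from by rw [pvRev, ← hx]]; exact hrow)]
          have hany : ((pvCan ps n).any (fun s => PySem.List.pyGetD kept s false)) = false := by
            rw [Bool.eq_false_iff]
            exact fun h => hrow (hiff.mp h)
          have hB : (if (decide (x.1 ∈ P) && decide (x.2 ∈ P))
                  && !((PySem.List.pyGetD cands ((n : Int)) []).any (fun s => PySem.List.pyGetD kept s false))
              then (kept.set ((n : Int)).toNat true, row ++ [x.1 ++ x.2])
              else (kept, row)) = (kept.set n true, row ++ [x.1 ++ x.2]) := by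
            rw [hcand, hany]
            simp [hj, hk2]
          rw [hA, hB, hcast]
          have hkeptn : kept.getD n false = false := by
            cases hkn : kept.getD n false with
            | false => rfl
            | true => exact absurd (hk n hkn) (Nat.lt_irrefl n)
          have hnlt : n < kept.length := by rw [hlen]; exact hn
          apply ih (n + 1) (kept.set n true) (row ++ [x.1 ++ x.2]) h1' h2'
          · rw [List.length_set]; exact hlen
          · intro s hs
            rw [pvGetD_set kept n s hnlt] at hs
            split_ifs at hs with h
            · omega
            · exact Nat.lt_succ_of_lt (hk s hs)
          · intro y
            rw [List.mem_append]
            constructor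
            · rintro (hy | hy)
              · obtain ⟨s, hks, hfs⟩ := (hmem y).mp hy
                have hsn : s ≠ n := fun h => by rw [h, hkeptn] at hks; exact Bool.false_ne_true hks
                exact ⟨s, by rw [pvGetD_set kept n s hnlt, if_neg hsn]; exact hks, hfs⟩
              · refine ⟨n, by rw [pvGetD_set kept n n hnlt, if_pos rfl], ?_⟩
                rw [pvFwd, ← hx]
                exact (List.mem_singleton.mp hy).symm
            · rintro ⟨s, hks, hfs⟩
              by_cases hsn : s = n
              · right
                subst hsn
                rw [pvFwd, ← hx] at hfs
                simpa using hfs.symm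
              · left
                rw [pvGetD_set kept n s hnlt, if_neg hsn] at hks
                exact (hmem y).mpr ⟨s, hks, hfs⟩
      · have hA : pvAfun P row x = row := by rw [pvAfun, if_pos hj, if_neg hk2]
        have hB : (if (decide (x.1 ∈ P) && decide (x.2 ∈ P))
                && !((PySem.List.pyGetD cands ((n : Int)) []).any (fun s => PySem.List.pyGetD kept s false))
            then (kept.set ((n : Int)).toNat true, row ++ [x.1 ++ x.2])
            else (kept, row)) = (kept, row) := by simp [hk2]
        rw [hA, hB, hcast]
        exact ih (n + 1) kept row h1' h2' hlen (fun s hs => Nat.lt_succ_of_lt (hk s hs)) hmem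
    · have hA : pvAfun P row x = row := by rw [pvAfun, if_neg hj]
      have hB : (if (decide (x.1 ∈ P) && decide (x.2 ∈ P))
              && !((PySem.List.pyGetD cands ((n : Int)) []).any (fun s => PySem.List.pyGetD kept s false))
          then (kept.set ((n : Int)).toNat true, row ++ [x.1 ++ x.2])
          else (kept, row)) = (kept, row) := by simp [hj]
      rw [hA, hB, hcast]
      exact ih (n + 1) kept row h1' h2' hlen (fun s hs => Nat.lt_succ_of_lt (hk s hs)) hmem

lemma pvMapRangeComp {α β : Type} (l : List α) (d : α) (g : α → β) :
    (List.range l.length).map (fun i => g (l.getD i d)) = l.map g := by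
  have : (fun i => g (l.getD i d)) = g ∘ (fun i => l.getD i d) := rfl
  rw [this, ← List.map_map, pvMapRangeGetD]

-- ===== VERDICT (by name: the statement is the Claim_ definition above) =====
theorem sistema_relazioni_spec : Claim_equal_sistema_relazioni := by
  intro Relazioni Pr _hDom
  unfold Spec_sistema_relazioni
  unfold sistema_relazioni sistema_relazioni_alt
  simp only [pvPu_eq]
  rw [PySem.List.foldl_append_singleton_eq_map]
  simp only [List.nil_append]
  obtain ⟨hclen, hcv⟩ := pvCands_inv (pvPairs Relazioni) (pvPairs Relazioni) 0
      PySem.Dict.empty []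
      (by intro m _; rw [Nat.zero_add])
      (by simp)
      (by intro x; simp [PySem.Dict.getD_empty])
      rfl
      (by intro t ht; omega)
  rw [pvMapRangeComp Pr []
      (fun P => ((PySem.Dict.mk Relazioni).keys).foldl
        (fun acc j =>
          if j ∈ P then
            ((PySem.Dict.mk Relazioni).getD j []).foldl
              (fun acc2 k =>
                if k ∈ P then
                  if (if (j ++ k) = "" then j ++ k else k ++ j) ∉ acc2 then acc2 ++ [j ++ k]
                  else acc2
                else acc2)
              acc
          else acc)
        [])]
  apply List.map_congr_left
  intro body _
  rw [pvA_inner_eq Relazioni body]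
  have hstep := pvBody_inv (pvPairs Relazioni)
      (((PySem.List.enumerate (pvPairs Relazioni) ((0 : Nat) : Int)).foldl
          (fun (st : PySem.Dict String (List Int) × List (List Int)) tp =>
            (st.1.modify (tp.2.1 ++ tp.2.2) [] (fun li => li ++ [tp.1]),
             st.2 ++ [st.1.getD (tp.2.2 ++ tp.2.1) []]))
          (PySem.Dict.empty, [])).2)
      hcv body (pvPairs Relazioni) 0
      (List.replicate (pvPairs Relazioni).length false) []
      (by intro m _; rw [Nat.zero_add])
      (by rw [Nat.zero_add])
      (by rw [List.length_replicate])
      (by intro s hs; rw [pvGetD_replicate] at hs; exact absurd hs (by simp))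
      (by intro x; constructor
          · intro hx; exact absurd hx (List.not_mem_nil)
          · rintro ⟨sx, hks, _⟩; rw [pvGetD_replicate] at hks; exact absurd hks (by simp))
  rw [hstep]
  exact congrArg Prod.snd (PySem.List.foldl_congr_mem _ _ _ _
    (fun st tp _ => by
      have e1 : decide (tp.2.1 ∈ body) = decide (tp.2.1 ∈ PySem.Set.ofList body) := by
        simp [PySem.Set.mem_ofList]
      have e2 : decide (tp.2.2 ∈ body) = decide (tp.2.2 ∈ PySem.Set.ofList body) := by
        simp [PySem.Set.mem_ofList]
      rw [e1, e2]
      rfl))
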